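-- pv_equiv track=rewrite | github.com/moorts/AoC2020 | Day20/sol2.py | get_mutations
-- ===== SOURCE A (Python) =====
-- def get_mutations(tile):
--     mutations = []
--     mutations.append(tile[1])
--     flipped_h = tile[1][::-1]
--     flipped_v = [tile[1][i][::-1] for i in range(len(tile[1]))]
--     r1 = flipped_v[::-1]
--     r2 = rotate_right(tile)
--     r3 = rotate_left(tile)
--     mutations.append(flipped_v)
--     mutations.append(flipped_h)
--     mutations.append(r1)
--     mutations.append(r2)
--     mutations.append(r3)
--     return mutations
--
-- def rotate_right(tile):
--     rotated = ["".join([tile[1][i][len(tile[1])-j-1] for i in range(len(tile[1]))]) for j in range(len(tile[1]))]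
--     return rotated
--
-- def rotate_left(tile):
--     return ["".join([tile[1][len(tile[1])-i-1][j] for i in range(len(tile[1]))]) for j in range(len(tile[1]))]
-- ===== SOURCE B (Python) =====
-- def _cols(rows):
--     # transpose by recursive column-peeling: split the first character off every row
--     if not rows or not rows[0]:
--         return []
--     return ["".join(r[0] for r in rows)] + _cols([r[1:] for r in rows])
--
-- def get_mutations(tile):
--     g = tile[1]
--     n = len(g)
--     c = _cols([row[:n] for row in g])          # the n columns of the n x n core, top-to-bottom
--     flipped_v = [row[::-1] for row in g]
--     return [g, flipped_v, g[::-1], flipped_v[::-1],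
--             c[::-1],                            # rotate right = columns in reverse order
--             [col[::-1] for col in c]]           # rotate left  = each column bottom-up
-- ===== Notes on version B (the rewrite author's own statement) =====
-- stated objective: alternative
-- what changed: B computes the grid's transpose once by recursive column-peeling (splitting the first character off every row, recursing on the rest) and derives both rotations from those columns by reversals, instead of A's three separate nested index-arithmetic comprehensions.
import Mathlib
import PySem

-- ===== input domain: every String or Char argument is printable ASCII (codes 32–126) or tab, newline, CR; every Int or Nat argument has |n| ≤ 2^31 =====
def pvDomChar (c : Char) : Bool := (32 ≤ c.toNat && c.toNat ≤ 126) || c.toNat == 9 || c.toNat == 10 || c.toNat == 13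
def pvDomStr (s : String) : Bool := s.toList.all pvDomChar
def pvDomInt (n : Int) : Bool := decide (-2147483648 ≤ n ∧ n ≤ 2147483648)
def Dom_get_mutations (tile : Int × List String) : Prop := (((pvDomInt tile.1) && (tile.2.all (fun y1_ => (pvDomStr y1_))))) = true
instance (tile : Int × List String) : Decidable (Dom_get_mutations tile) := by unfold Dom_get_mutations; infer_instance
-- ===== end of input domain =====

-- ===== PORT A =====
-- B computes the transpose once by recursive column-peeling and derives both rotations from it (simpler decomposition, same cost); proven equal on non-ragged grids.
-- char access g[i][k]: indices here are always ≥ 0; out-of-range (Python IndexError) is excluded by Pre_, the default ' ' is never read there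
def pvCharGet (g : List String) (i k : Nat) : Char := ((g.getD i "").toList).getD k ' '

def rotate_right (tile : Int × List String) : List String :=
  let n := tile.2.length
  (List.range n).map (fun j => String.ofList ((List.range n).map (fun i => pvCharGet tile.2 i (n - j - 1))))

def rotate_left (tile : Int × List String) : List String :=
  let n := tile.2.length
  (List.range n).map (fun j => String.ofList ((List.range n).map (fun i => pvCharGet tile.2 (n - i - 1) j)))

def get_mutations (tile : Int × List String) : List (List String) :=
  let flipped_h := tile.2.reverse
  let flipped_v := (List.range tile.2.length).map (fun i => String.ofList ((tile.2.getD i "").toList.reverse))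
  let r1 := flipped_v.reverse
  let r2 := rotate_right tile
  let r3 := rotate_left tile
  [tile.2, flipped_v, flipped_h, r1, r2, r3]

-- ===== PORT B =====
-- r[0] is ported as headD ' '; under Pre_ every fed row is nonempty exactly when the first one is, so the default is never read
def colsB (rows : List (List Char)) : List String :=
  if h : rows = [] ∨ rows.headD [] = [] then []
  else
    String.ofList (rows.map (fun r => r.headD ' ')) :: colsB (rows.map (fun r => r.drop 1))
termination_by (rows.headD []).length
decreasing_by
  rw [not_or] at h
  obtain ⟨h1, h2⟩ := h
  cases rows with
  | nil => exact absurd rfl h1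
  | cons a t =>
    simp only [List.headD_cons]
    cases a with
    | nil => exact absurd rfl h2
    | cons c cs => simp

def get_mutations_alt (tile : Int × List String) : List (List String) :=
  let g := tile.2
  let n := g.length
  let c := colsB (g.map (fun row => row.toList.take n))
  let flipped_v := g.map (fun row => String.ofList row.toList.reverse)
  [g, flipped_v, g.reverse, flipped_v.reverse,
   c.reverse,
   c.map (fun col => String.ofList col.toList.reverse)]

-- ===== PRECONDITION & SPEC =====
-- Pre_ excludes exactly the ragged grids (a row shorter than the number of rows) on which Python A raises IndexError.
def Pre_get_mutations (tile : Int × List String) : Prop :=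
  ∀ row ∈ tile.2, tile.2.length ≤ row.toList.length
instance (tile : Int × List String) : Decidable (Pre_get_mutations tile) := by unfold Pre_get_mutations; infer_instance
def pvWitness_get_mutations : (Int × List String) := (7, ["ab", "cd"])
def Spec_get_mutations (tile : Int × List String) (out : List (List String)) : Prop := out = get_mutations_alt tile
instance (tile : Int × List String) (out : List (List String)) : Decidable (Spec_get_mutations tile out) := by unfold Spec_get_mutations; infer_instance

-- ===== CLAIM (what is proved, stated in full; the proofs are below) =====
def Claim_equal_get_mutations : Prop := ∀ (tile : Int × List String), Dom_get_mutations tile → Pre_get_mutations tile → Spec_get_mutations tile (get_mutations tile)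

-- ===== LEMMAS AND PROOFS =====

-- (range n).map over defaulted getD equals map over the list itself
theorem map_range_getD {α β : Type} (xs : List α) (d : α) (f : α → β) :
    (List.range xs.length).map (fun i => f (xs.getD i d)) = xs.map f := by
  apply List.ext_getElem
  · simp
  · intro i h1 h2
    simp only [List.length_map, List.length_range] at h1
    simp [List.getElem?_eq_getElem h1]

-- reversing the outer map over range flips the index: F (n-j-1)
theorem map_range_reverse {β : Type} (n : Nat) (F : Nat → β) :
    ((List.range n).map F).reverse = (List.range n).map (fun j => F (n - j - 1)) := by
  apply List.ext_getElem
  · simp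
  · intro i h1 h2
    simp only [List.length_map, List.length_range] at h1 h2
    simp only [List.getElem_reverse, List.length_map, List.length_range,
      List.getElem_map, List.getElem_range]
    congr 1
    omega

-- column-peeling computes the index-wise transpose when all rows have length m (and rows = [] only if m = 0)
theorem colsB_eq (m : Nat) (rows : List (List Char))
    (hlen : ∀ r ∈ rows, r.length = m) (hnil : rows = [] → m = 0) :
    colsB rows = (List.range m).map (fun j => String.ofList (rows.map (fun r => r.getD j ' '))) := by
  induction m generalizing rows with
  | zero =>
    rw [colsB]
    simp only [List.range_zero, List.map_nil]
    rw [dif_pos]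
    cases rows with
    | nil => exact Or.inl rfl
    | cons a t =>
      right
      simp only [List.headD_cons]
      exact List.eq_nil_of_length_eq_zero (hlen a (by simp))
  | succ m ih =>
    have hne : rows ≠ [] := by
      intro h; exact Nat.succ_ne_zero m (hnil h)
    obtain ⟨a, t, rfl⟩ := List.exists_cons_of_ne_nil hne
    have ha : a.length = m + 1 := hlen a (by simp)
    have hane : a ≠ [] := by intro h; simp [h] at ha
    rw [colsB]
    rw [dif_neg (by simp [hane])]
    rw [List.range_succ_eq_map]
    simp only [List.map_cons, List.map_map]
    congr 1
    · congr 1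
      congr 1
      · cases a <;> simp [List.getD]
      · apply List.map_congr_left
        intro r _
        cases r <;> simp [List.getD]
    · rw [ih (List.drop 1 a :: t.map (fun r => List.drop 1 r))
          (by
            intro r hr
            rcases List.mem_cons.mp hr with h | h
            · subst h; simp [ha]
            · simp only [List.mem_map] at h
              obtain ⟨r0, hr0, rfl⟩ := h
              have := hlen r0 (List.mem_cons_of_mem _ hr0)
              simp [this])
          (by simp)]
      apply List.map_congr_left
      intro j _
      simp only [Function.comp, List.map_cons, List.map_map]
      congr 1
      congr 1
      · cases a with
        | nil => simp at ha
        | cons c cs => simp [List.getD]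
      · apply List.map_congr_left
        intro r hr
        have hrl : r.length = m + 1 := hlen r (List.mem_cons_of_mem _ hr)
        cases r with
        | nil => simp at hrl
        | cons c cs => simp [List.getD]

-- take n does not change getD at an index below n
theorem getD_take (l : List Char) (n j : Nat) (hj : j < n) :
    (l.take n).getD j ' ' = l.getD j ' ' := by
  simp only [List.getD, List.getElem?_take]
  rw [if_pos hj]

theorem colsB_spec (g : List String) (hpre : ∀ row ∈ g, g.length ≤ row.toList.length) :
    colsB (g.map (fun row => row.toList.take g.length)) =
      (List.range g.length).map (fun j => String.ofList (g.map (fun row => row.toList.getD j ' '))) := by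
  rw [colsB_eq g.length]
  · apply List.map_congr_left
    intro j hj
    simp only [List.mem_range] at hj
    simp only [List.map_map]
    congr 1
    apply List.map_congr_left
    intro r hr
    simp only [Function.comp]
    exact getD_take r.toList g.length j hj
  · intro r hr
    simp only [List.mem_map] at hr
    obtain ⟨r0, hr0, rfl⟩ := hr
    have h2 := hpre r0 hr0
    rw [List.length_take]
    omega
  · intro h
    simpa using congrArg List.length h

-- rotate_right is the columns in reverse order
theorem rotate_right_eq (tile : Int × List String)
    (hpre : ∀ row ∈ tile.2, tile.2.length ≤ row.toList.length) :
    rotate_right tile = (colsB (tile.2.map (fun row => row.toList.take tile.2.length))).reverse := by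
  rw [colsB_spec tile.2 hpre, map_range_reverse]
  simp only [rotate_right]
  apply List.map_congr_left
  intro j _
  congr 1
  have := map_range_getD tile.2 "" (fun row => row.toList.getD (tile.2.length - j - 1) ' ')
  rw [← this]
  rfl

-- rotate_left is each column read bottom-up
theorem rotate_left_eq (tile : Int × List String)
    (hpre : ∀ row ∈ tile.2, tile.2.length ≤ row.toList.length) :
    rotate_left tile =
      (colsB (tile.2.map (fun row => row.toList.take tile.2.length))).map
        (fun col => String.ofList col.toList.reverse) := by
  rw [colsB_spec tile.2 hpre]
  simp only [rotate_left, List.map_map]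
  apply List.map_congr_left
  intro j _
  simp only [Function.comp, String.toList_ofList]
  congr 1
  rw [← map_range_reverse tile.2.length (fun i => pvCharGet tile.2 i j)]
  congr 1
  exact map_range_getD tile.2 "" (fun row => row.toList.getD j ' ')

-- ===== VERDICT (by name: the statement is the Claim_ definition above) =====
theorem get_mutations_spec : Claim_equal_get_mutations := by
  intro tile _ hpre
  unfold Spec_get_mutations get_mutations get_mutations_alt
  simp only [rotate_right_eq tile hpre, rotate_left_eq tile hpre,
    map_range_getD tile.2 "" (fun row => String.ofList row.toList.reverse)]
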